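-- pv_equiv track=rewrite | github.com/Bharath-Naveen/containerized-phishing-project | src/app_v1/feature_extract.py | _url_auth_token_signal
-- ===== SOURCE A (Python) =====
-- def _url_auth_token_signal(url: str) -> bool:
--     u = (url or "").lower()
--     tokens = (
--         "login",
--         "signin",
--         "sign-in",
--         "verify",
--         "secure",
--         "account",
--         "auth",
--         "sso",
--         "oauth",
--         "password",
--         "mfa",
--         "2fa",
--     )
--     return any(tok in u for tok in tokens)
-- ===== SOURCE B (Python) =====
-- _TOKENS = (
--     "login",
--     "signin",
--     "sign-in",
--     "verify",
--     "secure",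
--     "account",
--     "auth",
--     "sso",
--     "oauth",
--     "password",
--     "mfa",
--     "2fa",
-- )
--
--
-- def _url_auth_token_signal(url: str) -> bool:
--     # Single left-to-right scan: at each position test whether some token starts there,
--     # instead of twelve independent substring-membership passes.
--     u = (url or "").lower()
--     return any(u.startswith(tok, i) for i in range(len(u)) for tok in _TOKENS)
-- ===== Notes on version B (the rewrite author's own statement) =====
-- stated objective: alternative
-- what changed: Replaces twelve independent substring-membership passes (one per token) with a single left-to-right scan of the lowercased URL that tests at each position whether some token starts there.
import Mathlib
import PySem

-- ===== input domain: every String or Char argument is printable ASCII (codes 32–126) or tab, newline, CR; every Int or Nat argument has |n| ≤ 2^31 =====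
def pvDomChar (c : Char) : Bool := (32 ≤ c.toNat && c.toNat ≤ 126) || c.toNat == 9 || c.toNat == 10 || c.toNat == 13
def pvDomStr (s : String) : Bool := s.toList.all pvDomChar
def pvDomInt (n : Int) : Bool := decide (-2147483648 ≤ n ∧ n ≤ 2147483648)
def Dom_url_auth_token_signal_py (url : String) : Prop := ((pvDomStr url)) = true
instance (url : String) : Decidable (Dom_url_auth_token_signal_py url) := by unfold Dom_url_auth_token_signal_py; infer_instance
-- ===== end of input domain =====

-- B replaces twelve independent substring-membership passes by one left-to-right scan that
-- tests each position for a token start (objective: alternative traversal; exact same output).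

-- ===== PORT A =====
def url_auth_token_signal_py (url : String) : Bool :=
  let u := PySem.Str.lower (if url = "" then "" else url)  -- (url or "").lower()
  (["login", "signin", "sign-in", "verify", "secure", "account",
    "auth", "sso", "oauth", "password", "mfa", "2fa"] : List String).any
    (fun tok => PySem.Str.isIn tok u)                      -- any(tok in u for tok in tokens)

-- ===== PORT B =====
def pvTokensB : List String :=
  ["login", "signin", "sign-in", "verify", "secure", "account",
   "auth", "sso", "oauth", "password", "mfa", "2fa"]

def url_auth_token_signal_py_alt (url : String) : Bool :=
  let u := PySem.Str.lower (if url = "" then "" else url)  -- (url or "").lower()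
  -- any(u.startswith(tok, i) for i in range(len(u)) for tok in _TOKENS);
  -- u.startswith(tok, i) with 0 ≤ i < len(u) is ported by hand as a prefix test on the
  -- i-dropped character list, which is exact for in-range non-negative i.
  (PySem.List.pyRange 0 (PySem.Str.len u) 1).any (fun i =>
    pvTokensB.any (fun tok => PySem.Chars.startswith (u.toList.drop i.toNat) tok.toList))

-- ===== PRECONDITION & SPEC =====
def Spec_url_auth_token_signal_py (url : String) (out : Bool) : Prop := out = url_auth_token_signal_py_alt url
instance (url : String) (out : Bool) : Decidable (Spec_url_auth_token_signal_py url out) := by unfold Spec_url_auth_token_signal_py; infer_instance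

-- ===== CLAIM (what is proved, stated in full; the proofs are below) =====
def Claim_equal_url_auth_token_signal_py : Prop := ∀ (url : String), Dom_url_auth_token_signal_py url → Spec_url_auth_token_signal_py url (url_auth_token_signal_py url)

-- ===== LEMMAS AND PROOFS =====

-- Membership of a nonempty token as a substring = some scan position where it is a prefix.
theorem pv_any_isIn_eq_scan (toks : List String) (h : ∀ t ∈ toks, t.toList ≠ [])
    (l : List Char) :
    toks.any (fun tok => PySem.Chars.isIn tok.toList l)
      = (PySem.List.pyRange 0 (l.length : Int) 1).any (fun i =>
          toks.any (fun tok => PySem.Chars.startswith (l.drop i.toNat) tok.toList)) := by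
  rw [Bool.eq_iff_iff]
  simp only [List.any_eq_true, PySem.List.mem_pyRange_one, PySem.Chars.startswith_iff]
  constructor
  · rintro ⟨tok, htok, hin⟩
    obtain ⟨j, hj⟩ := (PySem.Chars.exists_prefix_drop_iff_isIn tok.toList l).mpr hin
    have hjlt : j < l.length := by
      by_contra hge
      rw [List.drop_eq_nil_of_le (le_of_not_gt hge)] at hj
      exact h tok htok (List.prefix_nil.mp hj)
    refine ⟨(j : Int), ⟨by positivity, by exact_mod_cast hjlt⟩, tok, htok, ?_⟩
    simpa using hj
  · rintro ⟨i, ⟨h0, hi⟩, tok, htok, hpre⟩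
    exact ⟨tok, htok, (PySem.Chars.exists_prefix_drop_iff_isIn tok.toList l).mp ⟨i.toNat, hpre⟩⟩

-- ===== VERDICT (by name: the statement is the Claim_ definition above) =====
theorem url_auth_token_signal_py_spec : Claim_equal_url_auth_token_signal_py := by
  intro url _
  show url_auth_token_signal_py url = url_auth_token_signal_py_alt url
  unfold url_auth_token_signal_py url_auth_token_signal_py_alt pvTokensB
  simp only [PySem.Str.isIn_eq, PySem.Str.len_eq, PySem.Str.toList_lower]
  exact pv_any_isIn_eq_scan _ (by decide) _
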